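-- pv_equiv track=rewrite | github.com/currentJob/development-Repository | Modbus/modbus_cli.py | create_slave_context
-- ===== SOURCE A (Python) =====
-- def coil_addr(modbus_address):
--     """Coil(0xxxx) 주소를 내부 인덱스로 변환"""
--     return modbus_address - 1
--
-- def discrete_input_addr(modbus_address):
--     """Discrete Input(1xxxx) 주소를 내부 인덱스로 변환"""
--     return modbus_address - 10001
--
-- def input_register_addr(modbus_address):
--     """Input Register(3xxxx) 주소를 내부 인덱스로 변환"""
--     return modbus_address - 30001
--
-- def holding_register_addr(modbus_address):
--     """Holding Register(4xxxx) 주소를 내부 인덱스로 변환"""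
--     return modbus_address - 40001
--
-- def get_internal_address(addr):
--     """입력된 Modbus 주소에 따라 레지스터 타입과 내부 인덱스를 반환"""
--     if 1 <= addr <= 9999:
--         return 'co', coil_addr(addr)
--     elif 10001 <= addr <= 19999:
--         return 'di', discrete_input_addr(addr)
--     elif 30001 <= addr <= 39999:
--         return 'ir', input_register_addr(addr)
--     elif 40001 <= addr <= 49999:
--         return 'hr', holding_register_addr(addr)
--     else:
--         raise ValueError(f"지원하지 않는 Modbus 주소 범위: {addr}")
--
-- def create_slave_context(data):
--     """레지스터 타입별로 데이터를 나누고, Modbus 서버 컨텍스트를 생성"""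
--     co = {}
--     di = {}
--     hr = {}
--     ir = {}
--
--     for addr in data:
--         if not isinstance(addr, int):
--             continue
--         reg_type, offset = get_internal_address(addr)
--         if reg_type == 'co':
--             co[offset] = addr
--         elif reg_type == 'di':
--             di[offset] = addr
--         elif reg_type == 'hr':
--             hr[offset] = addr
--         elif reg_type == 'ir':
--             ir[offset] = addr
--
--     return co, di, hr, ir
-- ===== SOURCE B (Python) =====
-- def create_slave_context(data):
--     """레지스터 타입별로 데이터를 나누고, Modbus 서버 컨텍스트를 생성"""
--     ints = [a for a in data if isinstance(a, int)]
--     for a in ints: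
--         if not (1 <= a <= 9999 or 10001 <= a <= 19999
--                 or 30001 <= a <= 39999 or 40001 <= a <= 49999):
--             raise ValueError(f"지원하지 않는 Modbus 주소 범위: {a}")
--     co = {a - 1: a for a in ints if 1 <= a <= 9999}
--     di = {a - 10001: a for a in ints if 10001 <= a <= 19999}
--     hr = {a - 40001: a for a in ints if 40001 <= a <= 49999}
--     ir = {a - 30001: a for a in ints if 30001 <= a <= 39999}
--     return co, di, hr, ir
-- ===== Notes on version B (the rewrite author's own statement) =====
-- stated objective: alternative
-- what changed: Replaced A's single accumulating loop with a per-element range dispatcher by a staged design: one validation pass that rejects unsupported addresses, then four independent dict comprehensions, one per register bank, each filtering its own address range.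
import Mathlib
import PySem

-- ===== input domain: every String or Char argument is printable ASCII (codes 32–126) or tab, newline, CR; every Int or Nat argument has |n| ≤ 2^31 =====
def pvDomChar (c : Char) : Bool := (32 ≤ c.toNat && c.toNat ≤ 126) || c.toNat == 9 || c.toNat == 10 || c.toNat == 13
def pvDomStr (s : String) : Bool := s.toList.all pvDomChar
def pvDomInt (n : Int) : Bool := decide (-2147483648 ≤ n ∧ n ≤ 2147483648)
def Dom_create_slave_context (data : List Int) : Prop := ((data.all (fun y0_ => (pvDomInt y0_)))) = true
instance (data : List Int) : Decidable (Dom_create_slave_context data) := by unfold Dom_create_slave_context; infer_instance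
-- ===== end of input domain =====

-- B replaces A's single accumulating loop with a staged design: a validation pass,
-- then four independent per-bank dict comprehensions; objective: alternative, same O(n) cost.

-- ===== PORT A =====
-- get_internal_address: none = the ValueError branch (excluded by Pre_)
def csc_get_internal_address (addr : Int) : Option (String × Int) :=
  if 1 ≤ addr ∧ addr ≤ 9999 then some ("co", addr - 1)
  else if 10001 ≤ addr ∧ addr ≤ 19999 then some ("di", addr - 10001)
  else if 30001 ≤ addr ∧ addr ≤ 39999 then some ("ir", addr - 30001)
  else if 40001 ≤ addr ∧ addr ≤ 49999 then some ("hr", addr - 40001)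
  else none

-- A's loop body (the for-loop over data; isinstance(addr, int) is always true on List Int)
def csc_stepA (st : PySem.Dict Int Int × PySem.Dict Int Int × PySem.Dict Int Int × PySem.Dict Int Int)
    (addr : Int) : PySem.Dict Int Int × PySem.Dict Int Int × PySem.Dict Int Int × PySem.Dict Int Int :=
  match csc_get_internal_address addr with
  | none => st  -- ValueError: unreachable under Pre_
  | some (rt, off) =>
    if rt == "co" then (st.1.insert off addr, st.2.1, st.2.2.1, st.2.2.2)
    else if rt == "di" then (st.1, st.2.1.insert off addr, st.2.2.1, st.2.2.2)
    else if rt == "hr" then (st.1, st.2.1, st.2.2.1.insert off addr, st.2.2.2)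
    else if rt == "ir" then (st.1, st.2.1, st.2.2.1, st.2.2.2.insert off addr)
    else st

def create_slave_context (data : List Int) : (List (Int × Int)) × (List (Int × Int)) × (List (Int × Int)) × (List (Int × Int)) :=
  let st := data.foldl csc_stepA (PySem.Dict.empty, PySem.Dict.empty, PySem.Dict.empty, PySem.Dict.empty)
  (st.1.items, st.2.1.items, st.2.2.1.items, st.2.2.2.items)

-- ===== PORT B =====
-- validation pass predicate (the raise condition, negated)
def csc_valid (a : Int) : Bool :=
  decide ((1 ≤ a ∧ a ≤ 9999) ∨ (10001 ≤ a ∧ a ≤ 19999) ∨ (30001 ≤ a ∧ a ≤ 39999) ∨ (40001 ≤ a ∧ a ≤ 49999))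

def create_slave_context_alt (data : List Int) : (List (Int × Int)) × (List (Int × Int)) × (List (Int × Int)) × (List (Int × Int)) :=
  -- ints = [a for a in data if isinstance(a, int)] is data itself on List Int
  if data.all csc_valid then
    ((PySem.Dict.ofList ((data.filter (fun a => decide (1 ≤ a ∧ a ≤ 9999))).map (fun a => (a - 1, a)))).items,
     (PySem.Dict.ofList ((data.filter (fun a => decide (10001 ≤ a ∧ a ≤ 19999))).map (fun a => (a - 10001, a)))).items,
     (PySem.Dict.ofList ((data.filter (fun a => decide (40001 ≤ a ∧ a ≤ 49999))).map (fun a => (a - 40001, a)))).items,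
     (PySem.Dict.ofList ((data.filter (fun a => decide (30001 ≤ a ∧ a ≤ 39999))).map (fun a => (a - 30001, a)))).items)
  else ([], [], [], [])  -- the ValueError of the validation pass (excluded by Pre_)

-- ===== PRECONDITION & SPEC =====
-- Pre_ excludes inputs containing an address outside the four supported Modbus ranges, on which A raises ValueError.
def Pre_create_slave_context (data : List Int) : Prop :=
  ∀ a ∈ data, (1 ≤ a ∧ a ≤ 9999) ∨ (10001 ≤ a ∧ a ≤ 19999) ∨ (30001 ≤ a ∧ a ≤ 39999) ∨ (40001 ≤ a ∧ a ≤ 49999)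
instance (data : List Int) : Decidable (Pre_create_slave_context data) := by unfold Pre_create_slave_context; infer_instance

def pvWitness_create_slave_context : List Int := [1, 9999, 10001, 30001, 40001, 42, 42]

def Spec_create_slave_context (data : List Int) (out : (List (Int × Int)) × (List (Int × Int)) × (List (Int × Int)) × (List (Int × Int))) : Prop := out = create_slave_context_alt data
instance (data : List Int) (out : (List (Int × Int)) × (List (Int × Int)) × (List (Int × Int)) × (List (Int × Int))) : Decidable (Spec_create_slave_context data out) := by unfold Spec_create_slave_context; infer_instance

-- ===== CLAIM =====
def Claim_equal_create_slave_context : Prop := ∀ (data : List Int), Dom_create_slave_context data → Pre_create_slave_context data → Spec_create_slave_context data (create_slave_context data)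

-- ===== LEMMAS AND PROOFS =====

-- A's single loop, run on all-valid data, is the four independent filtered insert-loops
theorem csc_foldA_eq (l : List Int)
    (h : ∀ a ∈ l, (1 ≤ a ∧ a ≤ 9999) ∨ (10001 ≤ a ∧ a ≤ 19999) ∨ (30001 ≤ a ∧ a ≤ 39999) ∨ (40001 ≤ a ∧ a ≤ 49999))
    (st : PySem.Dict Int Int × PySem.Dict Int Int × PySem.Dict Int Int × PySem.Dict Int Int) :
    l.foldl csc_stepA st =
      ((l.filter (fun a => decide (1 ≤ a ∧ a ≤ 9999))).foldl (fun d a => d.insert (a - 1) a) st.1,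
       (l.filter (fun a => decide (10001 ≤ a ∧ a ≤ 19999))).foldl (fun d a => d.insert (a - 10001) a) st.2.1,
       (l.filter (fun a => decide (40001 ≤ a ∧ a ≤ 49999))).foldl (fun d a => d.insert (a - 40001) a) st.2.2.1,
       (l.filter (fun a => decide (30001 ≤ a ∧ a ≤ 39999))).foldl (fun d a => d.insert (a - 30001) a) st.2.2.2) := by
  induction l generalizing st with
  | nil => rfl
  | cons a l ih =>
    have ha := h a (List.mem_cons_self)
    have hrest : ∀ x ∈ l, (1 ≤ x ∧ x ≤ 9999) ∨ (10001 ≤ x ∧ x ≤ 19999) ∨ (30001 ≤ x ∧ x ≤ 39999) ∨ (40001 ≤ x ∧ x ≤ 49999) :=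
      fun x hx => h x (List.mem_cons_of_mem a hx)
    rw [List.foldl_cons]
    rw [ih hrest]
    rcases ha with ⟨h1, h2⟩ | ⟨h1, h2⟩ | ⟨h1, h2⟩ | ⟨h1, h2⟩ <;>
      simp only [csc_stepA, csc_get_internal_address, List.filter_cons,
        decide_eq_true_eq] <;>
      split_ifs <;> first | rfl | omega

-- the B-side dict comprehension as a fold (dict comprehension = insert loop, List.foldl_map)
theorem csc_ofList_map (l : List Int) (f : Int → Int) :
    PySem.Dict.ofList (l.map (fun a => (f a, a))) =
      l.foldl (fun d a => d.insert (f a) a) PySem.Dict.empty := by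
  rw [show PySem.Dict.ofList (l.map (fun a => (f a, a)))
        = (l.map (fun a => (f a, a))).foldl (fun d p => d.insert p.1 p.2) PySem.Dict.empty from rfl,
      List.foldl_map]

-- ===== VERDICT =====
theorem create_slave_context_spec : Claim_equal_create_slave_context := by
  intro data _ hpre
  unfold Spec_create_slave_context create_slave_context create_slave_context_alt
  have hall : data.all csc_valid = true := by
    simp only [List.all_eq_true, csc_valid]
    intro a ha
    exact decide_eq_true (hpre a ha)
  rw [if_pos hall, csc_foldA_eq data hpre, csc_ofList_map, csc_ofList_map, csc_ofList_map, csc_ofList_map]
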